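-- pv_equiv track=rewrite | github.com/nikolaus013/ProjekatGenetski | GenetskiAlgProj.py | dekoduj_bin
-- ===== SOURCE A (Python) =====
-- def dekoduj_bin(hromozom):
--     l = []
--     d = hromozom.encode()
--     for i in range(len(d)):
--         for mask in [0x80, 0x40, 0x20, 0x10, 0x08, 0x04, 0x02, 0x01]:
--             if mask & d[i] > 0:
--                 l.append(1)
--             else:
--                 l.append(0)
--     return l
-- ===== SOURCE B (Python) =====
-- def dekoduj_bin(hromozom):
--     d = hromozom.encode()
--     if not d:
--         return []
--     big = int.from_bytes(d, 'big')
--     s = format(big, '0{}b'.format(8 * len(d)))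
--     return [int(c) for c in s]
-- ===== Notes on version B (the rewrite author's own statement) =====
-- stated objective: alternative
-- what changed: Replaces the nested per-byte mask loop with a single int.from_bytes big-endian conversion followed by one flat bit-extraction pass over all 8*len positions.
import Mathlib
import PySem

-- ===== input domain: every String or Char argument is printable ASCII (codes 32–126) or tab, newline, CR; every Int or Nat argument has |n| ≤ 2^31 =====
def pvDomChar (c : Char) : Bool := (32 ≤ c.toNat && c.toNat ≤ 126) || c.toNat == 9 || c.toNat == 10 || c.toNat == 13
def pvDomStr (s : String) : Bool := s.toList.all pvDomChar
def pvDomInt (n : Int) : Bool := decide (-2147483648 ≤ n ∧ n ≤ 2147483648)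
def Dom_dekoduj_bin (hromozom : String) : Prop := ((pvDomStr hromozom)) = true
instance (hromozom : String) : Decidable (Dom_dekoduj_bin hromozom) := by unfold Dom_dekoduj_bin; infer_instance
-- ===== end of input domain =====

-- B replaces A's nested per-byte mask loop by one big-endian integer conversion plus a single
-- flat bit-extraction pass (objective: alternative decomposition, same cost).
-- On Dom (ASCII) each character encodes to the single byte c.toNat, which both ports use.

-- ===== PORT A =====
-- A: for each byte, test the eight masks MSB-first, appending 1 or 0 to the accumulator list.
def dekoduj_bin (hromozom : String) : List Int :=
  hromozom.toList.foldl (fun l c =>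
    ([0x80, 0x40, 0x20, 0x10, 0x08, 0x04, 0x02, 0x01] : List Nat).foldl
      (fun l2 mask => if mask &&& c.toNat > 0 then l2 ++ [(1 : Int)] else l2 ++ [(0 : Int)]) l) []

-- ===== PORT B =====
-- binary digits of n, MSB first ([] for n = 0): hand port of the digits format() produces
def pvBinStr (n : Nat) : List Char :=
  if n = 0 then [] else pvBinStr (n / 2) ++ [if n % 2 = 1 then '1' else '0']
decreasing_by exact Nat.div_lt_self (Nat.pos_of_ne_zero (by assumption)) (by norm_num)

-- B: big = int.from_bytes(d,'big'); s = format(big,'0{8*len d}b') (zero-padded binary, exact for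
-- widths ≥ 1 via pvBinStr + padding); [int(c) for c in s] (int(c) = c.toNat - 48, exact on digits).
def dekoduj_bin_alt (hromozom : String) : List Int :=
  let d := hromozom.toList
  if d.isEmpty then [] else
  let big := d.foldl (fun a c => a * 256 + c.toNat) 0
  let w := 8 * d.length
  let digits := if big = 0 then ['0'] else pvBinStr big
  let s := List.replicate (w - digits.length) '0' ++ digits
  s.map (fun c => ((c.toNat - 48 : Nat) : Int))

-- ===== PRECONDITION & SPEC =====
def Spec_dekoduj_bin (hromozom : String) (out : List Int) : Prop := out = dekoduj_bin_alt hromozom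
instance (hromozom : String) (out : List Int) : Decidable (Spec_dekoduj_bin hromozom out) := by unfold Spec_dekoduj_bin; infer_instance

-- ===== CLAIM (what is proved, stated in full; the proofs are below) =====
def Claim_equal_dekoduj_bin : Prop := ∀ (hromozom : String), Dom_dekoduj_bin hromozom → Spec_dekoduj_bin hromozom (dekoduj_bin hromozom)

-- ===== LEMMAS AND PROOFS =====

-- the eight bits of one byte, as A's mask tests produce them
def pvMaskBits (n : Nat) : List Int :=
  [if 0x80 &&& n > 0 then 1 else 0, if 0x40 &&& n > 0 then 1 else 0,
   if 0x20 &&& n > 0 then 1 else 0, if 0x10 &&& n > 0 then 1 else 0,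
   if 0x08 &&& n > 0 then 1 else 0, if 0x04 &&& n > 0 then 1 else 0,
   if 0x02 &&& n > 0 then 1 else 0, if 0x01 &&& n > 0 then 1 else 0]

theorem pv_ite_append (p : Prop) [Decidable p] (l : List Int) (a b : Int) :
    (if p then l ++ [a] else l ++ [b]) = l ++ [if p then a else b] := by
  split_ifs <;> rfl

-- A's inner mask loop appends exactly pvMaskBits
theorem pv_inner_eq (l : List Int) (c : Char) :
    ([0x80, 0x40, 0x20, 0x10, 0x08, 0x04, 0x02, 0x01] : List Nat).foldl
      (fun l2 mask => if mask &&& c.toNat > 0 then l2 ++ [(1 : Int)] else l2 ++ [(0 : Int)]) l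
    = l ++ pvMaskBits c.toNat := by
  simp only [List.foldl, pv_ite_append]
  simp [pvMaskBits, List.append_assoc]

theorem pv_foldl_flatMap (g : Char → List Int) :
    ∀ (cs : List Char) (l : List Int),
      cs.foldl (fun l2 c => l2 ++ g c) l = l ++ cs.flatMap g := by
  intro cs
  induction cs with
  | nil => simp
  | cons c cs ih => intro l; simp only [List.foldl, List.flatMap_cons, ih, List.append_assoc]

theorem pv_A_flatMap (h : String) :
    dekoduj_bin h = h.toList.flatMap (fun c => pvMaskBits c.toNat) := by
  unfold dekoduj_bin
  have hf : (fun (l : List Int) (c : Char) =>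
      ([0x80, 0x40, 0x20, 0x10, 0x08, 0x04, 0x02, 0x01] : List Nat).foldl
        (fun l2 mask => if mask &&& c.toNat > 0 then l2 ++ [(1 : Int)] else l2 ++ [(0 : Int)]) l)
      = fun l c => l ++ pvMaskBits c.toNat :=
    funext fun l => funext fun c => pv_inner_eq l c
  rw [hf, pv_foldl_flatMap]
  simp

-- mask tests agree with bit extraction, for one byte
set_option maxRecDepth 4000 in
theorem pv_bits8 : ∀ n < 256, pvMaskBits n =
    (List.range 8).map (fun j => (((n >>> (7 - j)) &&& 1 : Nat) : Int)) := by decide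

-- dropping the low byte: bit (k+8) of b*256+cn is bit k of b
theorem pv_high_bit (b cn k : Nat) (hcn : cn < 256) :
    ((b * 256 + cn) >>> (k + 8)) &&& 1 = (b >>> k) &&& 1 := by
  have h1 : (b * 256 + cn) >>> (k + 8) = ((b * 256 + cn) / 256) / 2 ^ k := by
    rw [Nat.shiftRight_eq_div_pow, Nat.div_div_eq_div_mul]
    congr 1
    rw [pow_add]; ring
  have h2 : (b * 256 + cn) / 256 = b := by omega
  rw [h1, h2, Nat.shiftRight_eq_div_pow]

-- low byte: bit s (s < 8) of b*256+cn is bit s of cn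
theorem pv_low_bit (b cn s : Nat) (hs : s < 8) :
    ((b * 256 + cn) >>> s) &&& 1 = (cn >>> s) &&& 1 := by
  interval_cases s <;>
    simp only [Nat.shiftRight_eq_div_pow, Nat.and_one_is_mod] <;> norm_num <;> omega

def pvBig (cs : List Char) : Nat := cs.foldl (fun a c => a * 256 + c.toNat) 0

theorem pv_B_flatMap : ∀ (cs : List Char), (∀ c ∈ cs, c.toNat < 256) →
    (List.range (8 * cs.length)).map
      (fun i => (((pvBig cs >>> (8 * cs.length - 1 - i)) &&& 1 : Nat) : Int))
    = cs.flatMap (fun c => (List.range 8).map (fun j => (((c.toNat >>> (7 - j)) &&& 1 : Nat) : Int))) := by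
  intro cs
  induction cs using List.reverseRecOn with
  | nil => simp
  | append_singleton cs c ih =>
    intro hmem
    have hc : c.toNat < 256 := hmem c (by simp)
    have hcs : ∀ x ∈ cs, x.toNat < 256 := fun x hx => hmem x (by simp [hx])
    have hbig : pvBig (cs ++ [c]) = pvBig cs * 256 + c.toNat := by
      simp [pvBig, List.foldl_append]
    have hlen : 8 * (cs ++ [c]).length = 8 * cs.length + 8 := by simp; ring
    rw [hbig, hlen, List.range_add, List.map_append, List.map_map, List.flatMap_append]
    congr 1
    · rw [← ih hcs]
      apply List.map_congr_left
      intro i hi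
      have hi' : i < 8 * cs.length := List.mem_range.mp hi
      have he : 8 * cs.length + 8 - 1 - i = (8 * cs.length - 1 - i) + 8 := by omega
      rw [he, pv_high_bit _ _ _ hc]
    · simp only [List.flatMap_singleton]
      apply List.map_congr_left
      intro j hj
      have hj' : j < 8 := List.mem_range.mp hj
      simp only [Function.comp_apply]
      have he : 8 * cs.length + 8 - 1 - (8 * cs.length + j) = 7 - j := by omega
      rw [he, pv_low_bit _ _ _ (by omega)]

-- bit extraction at every position, the common intermediate form
def pvRangeBits (w n : Nat) : List Int :=
  (List.range w).map (fun i => (((n >>> (w - 1 - i)) &&& 1 : Nat) : Int))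

theorem pv_rangeBits_zero (w : Nat) : pvRangeBits w 0 = List.replicate w 0 := by
  simp [pvRangeBits]

theorem pv_rangeBits_succ (w n : Nat) :
    pvRangeBits (w + 1) n = pvRangeBits w (n / 2) ++ [((n &&& 1 : Nat) : Int)] := by
  unfold pvRangeBits
  rw [List.range_succ, List.map_append]
  congr 1
  · apply List.map_congr_left
    intro i hi
    have hi' : i < w := List.mem_range.mp hi
    have he : w + 1 - 1 - i = 1 + (w - 1 - i) := by omega
    rw [he, Nat.shiftRight_add, Nat.shiftRight_one]
  · simp

theorem pv_padMap : ∀ (w n : Nat), 1 ≤ n → n < 2 ^ w →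
    (List.replicate (w - (pvBinStr n).length) '0' ++ pvBinStr n).map
      (fun c => ((c.toNat - 48 : Nat) : Int)) = pvRangeBits w n := by
  intro w
  induction w with
  | zero => intro n h1 h2; omega
  | succ w ih =>
    intro n h1 h2
    have hstep : pvBinStr n = pvBinStr (n / 2) ++ [if n % 2 = 1 then '1' else '0'] := by
      rw [pvBinStr, if_neg (by omega : ¬ n = 0)]
    have hdig : ((((if n % 2 = 1 then '1' else '0') : Char).toNat - 48 : Nat) : Int)
        = ((n &&& 1 : Nat) : Int) := by
      rw [Nat.and_one_is_mod]
      split_ifs with h <;> simp [h] <;> omega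
    rw [pv_rangeBits_succ]
    by_cases h0 : n / 2 = 0
    · -- n = 1
      have hn : n = 1 := by omega
      subst hn
      have hb : pvBinStr 1 = ['1'] := by
        rw [pvBinStr, if_neg (by omega : ¬ (1 : Nat) = 0)]
        norm_num
        rw [pvBinStr]
        simp
      rw [hb, pv_rangeBits_zero]
      have d0 : ((('0' : Char).toNat - 48 : Nat) : Int) = 0 := by decide
      have d1 : ((('1' : Char).toNat - 48 : Nat) : Int) = 1 := by decide
      have d2 : ((1 &&& 1 : Nat) : Int) = 1 := by decide
      simp only [List.length_cons, List.length_nil, List.map_append, List.map_replicate,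
        List.map_cons, List.map_nil, d0, d1, d2]
      norm_num
    · have h1' : 1 ≤ n / 2 := Nat.pos_of_ne_zero h0
      have h2' : n / 2 < 2 ^ w := by
        have : n < 2 ^ w * 2 := by rw [← pow_succ]; exact h2
        omega
      have hlen : (pvBinStr n).length = (pvBinStr (n / 2)).length + 1 := by
        rw [hstep]; simp
      have hcount : w + 1 - ((pvBinStr (n / 2)).length + 1) = w - (pvBinStr (n / 2)).length := by
        omega
      rw [hlen, hcount, hstep, ← List.append_assoc, List.map_append, ih (n / 2) h1' h2']
      simp [hdig]

theorem pv_big_lt : ∀ (cs : List Char), (∀ c ∈ cs, c.toNat < 256) →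
    pvBig cs < 2 ^ (8 * cs.length) := by
  intro cs
  induction cs using List.reverseRecOn with
  | nil => simp [pvBig]
  | append_singleton cs c ih =>
    intro hmem
    have hc : c.toNat < 256 := hmem c (by simp)
    have hcs : ∀ x ∈ cs, x.toNat < 256 := fun x hx => hmem x (by simp [hx])
    have hb := ih hcs
    have hbig : pvBig (cs ++ [c]) = pvBig cs * 256 + c.toNat := by
      simp [pvBig, List.foldl_append]
    have hlen : 8 * (cs ++ [c]).length = 8 * cs.length + 8 := by simp; ring
    rw [hbig, hlen, pow_add]
    have : (2 : Nat) ^ 8 = 256 := by norm_num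
    rw [this]
    nlinarith

theorem pv_flatMap_congr {f g : Char → List Int} :
    ∀ (cs : List Char), (∀ c ∈ cs, f c = g c) → cs.flatMap f = cs.flatMap g := by
  intro cs
  induction cs with
  | nil => intro _; rfl
  | cons c cs ih =>
    intro hfg
    simp only [List.flatMap_cons]
    rw [hfg c (by simp), ih (fun x hx => hfg x (by simp [hx]))]

-- ===== VERDICT (by name: the statement is the Claim_ definition above) =====
theorem dekoduj_bin_spec : Claim_equal_dekoduj_bin := by
  intro h hdom
  unfold Spec_dekoduj_bin
  have hchars : ∀ c ∈ h.toList, c.toNat < 256 := by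
    intro c hc
    have := List.all_eq_true.mp hdom c hc
    simp [pvDomChar] at this
    omega
  by_cases hemp : h.toList = []
  · rw [pv_A_flatMap, hemp]
    simp [dekoduj_bin_alt, hemp]

  · have hne : h.toList.isEmpty = false := by simp [hemp]
    have halt : dekoduj_bin_alt h = pvRangeBits (8 * h.toList.length) (pvBig h.toList) := by
      simp only [dekoduj_bin_alt, hne, Bool.false_eq_true, if_false]
      by_cases hz : h.toList.foldl (fun a c => a * 256 + c.toNat) 0 = 0
      · rw [if_pos hz]
        have hz' : pvBig h.toList = 0 := hz
        rw [hz', pv_rangeBits_zero]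
        simp only [List.length_cons, List.length_nil, List.map_append, List.map_replicate]
        have hd0 : ((('0' : Char).toNat - 48 : Nat) : Int) = 0 := by decide
        rw [hd0]
        have hlp : 0 < h.toList.length := List.length_pos_of_ne_nil hemp
        refine List.eq_replicate_iff.mpr ⟨?_, ?_⟩
        · simp only [List.length_append, List.length_replicate, List.length_map,
            List.length_cons, List.length_nil]
          omega
        · intro b hb
          simp at hb
          rcases hb with hb | hb
          · exact hb.2
          · exact hb
      · rw [if_neg hz]
        exact pv_padMap (8 * h.toList.length) (pvBig h.toList)
          (Nat.pos_of_ne_zero hz) (pv_big_lt h.toList hchars)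
    rw [pv_A_flatMap, halt]
    rw [show pvRangeBits (8 * h.toList.length) (pvBig h.toList)
        = (List.range (8 * h.toList.length)).map
            (fun i => (((pvBig h.toList >>> (8 * h.toList.length - 1 - i)) &&& 1 : Nat) : Int))
      from rfl]
    rw [pv_B_flatMap h.toList hchars]
    exact pv_flatMap_congr h.toList (fun c hc => pv_bits8 c.toNat (hchars c hc))
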